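-- pv_equiv track=rewrite | github.com/AndroidKitKat/gradebook-uploader | gb_export.py | build_comment
-- ===== SOURCE A (Python) =====
-- def calc_score(comments):
--     '''
--     calculates score from comments field
--     '''
--     score = 100
--     for item in comments:
--         # tries to total the score
--         try:
--             score -= abs(int(item))
--         except ValueError:
--             pass
--     return score
--
-- def build_comment(netid, comments):
--     '''
--     input:
--         netid:      netid
--         comments:   [q1_comment, q1_deduct, q2_comment, q2_deduct, ..., qN_comment, qN_deduct]
--
--
--     comment format
--     -------------
--     netid: $netid
--
--     Score: $score
--
--     Comments:
--         Problem 1: $deduction; $comment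
--         Problem 2: $deduction; $comment
--         ...
--         Problem N: $deduction; $comment
--         (if applicable)
--     '''
--     # num_q = len(comments) // 2
--     score = calc_score(comments)
--
--     # build comment
--     sakai_comment = '''netid: {}
-- Score: {}
--
-- '''.format(netid, score)
--
--     prblm_num = 1
--     # don't put comment header unless they get something wrong
--     header = False
--     while comments:
--         q_com = comments.pop(0)
--         q_ded = comments.pop(0)
--         if int(q_ded) != 0:
--             q_ded = -1 * abs(int(q_ded))
--             if not header:
--                 sakai_comment += 'Comments: \n'
--                 header = True
--             sakai_comment += '''    Problem {}: {:>3}; {}\n'''.format(prblm_num, q_ded, q_com)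
--         prblm_num += 1
--
--     return sakai_comment, score
-- ===== SOURCE B (Python) =====
-- def _try_int(s):
--     try:
--         return int(s)
--     except ValueError:
--         return None
--
--
-- def build_comment(netid, comments):
--     items = comments[:]
--     del comments[:]  # A empties the input list via pop(0); match that mutation
--     score = 100 - sum(abs(v) for v in map(_try_int, items) if v is not None)
--     it = iter(items)
--     lines = ['    Problem {}: {:>3}; {}\n'.format(n, -abs(int(d)), c)
--              for n, (c, d) in enumerate(zip(it, it), 1) if int(d) != 0]
--     head = 'netid: {}\nScore: {}\n\n'.format(netid, score)
--     if lines: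
--         head += 'Comments: \n' + ''.join(lines)
--     return head, score
-- ===== Notes on version B (the rewrite author's own statement) =====
-- stated objective: idiomatic
-- what changed: Replaces A's calc_score helper plus stateful while/pop(0) loop with flag and string accumulator by one sum() of the parseable deductions and a list comprehension over enumerate(zip(it,it)) pairs, joined once at the end.
import Mathlib
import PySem

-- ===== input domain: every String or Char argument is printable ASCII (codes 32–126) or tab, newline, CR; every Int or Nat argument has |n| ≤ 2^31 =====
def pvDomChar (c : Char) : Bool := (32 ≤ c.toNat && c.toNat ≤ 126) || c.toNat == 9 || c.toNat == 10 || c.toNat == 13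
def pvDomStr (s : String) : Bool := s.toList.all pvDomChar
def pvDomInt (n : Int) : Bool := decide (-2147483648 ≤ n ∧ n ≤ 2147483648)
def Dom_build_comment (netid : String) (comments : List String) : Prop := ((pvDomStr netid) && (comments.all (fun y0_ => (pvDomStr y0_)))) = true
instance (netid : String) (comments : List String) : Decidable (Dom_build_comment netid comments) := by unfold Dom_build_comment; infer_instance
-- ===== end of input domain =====

-- B is an idiomatic single-expression decomposition (sum + list comprehension over pairs) of A's
-- stateful while/pop loop; equivalence is about the RETURN value — both empty the input list on
-- inputs inside Pre_ (A via pop(0), B via del comments[:]). Strings are carried as List Char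
-- (PySem practice) and wrapped with String.ofList at the end.

-- shared formatting constants (both Pythons contain the same literal format strings)
-- '{:>3}'.format(d): str(d) right-aligned to width 3 with spaces
def pvPad3 (s : List Char) : List Char := List.replicate (3 - s.length) ' ' ++ s
-- '    Problem {}: {:>3}; {}\n'.format(n, ded, com)
def pvLine (n : Int) (ded : Int) (com : String) : List Char :=
  "    Problem ".toList ++ PySem.Int.toChars n ++ ": ".toList ++
    pvPad3 (PySem.Int.toChars ded) ++ "; ".toList ++ com.toList ++ ['\n']
-- 'netid: {}\nScore: {}\n\n'.format(netid, score)
def pvHead (netid : String) (score : Int) : List Char :=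
  "netid: ".toList ++ netid.toList ++ "\nScore: ".toList ++ PySem.Int.toChars score ++ "\n\n".toList

-- ===== PORT A =====
def calc_score (comments : List String) : Int :=
  comments.foldl (fun score item =>
    match PySem.Int.ofStr? item with   -- try: score -= abs(int(item)) except ValueError: pass
    | some n => score - |n|
    | none   => score) 100

-- the while loop: state (sakai_comment, prblm_num, header); pop(0) twice each iteration.
-- [] with one element left = IndexError, and a non-int q_ded = ValueError: both outside Pre_,
-- the port just stops there (value irrelevant outside Pre_).
def pvLoopA (sakai : List Char) (prblm : Int) (header : Bool) : List String → List Char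
  | [] => sakai
  | [_] => sakai                       -- IndexError (excluded by Pre_)
  | q_com :: q_ded :: rest =>
    match PySem.Int.ofStr? q_ded with
    | none => sakai                    -- ValueError (excluded by Pre_)
    | some d =>
      if d ≠ 0 then
        let d' := -1 * |d|
        let sakai' := (if header = false then sakai ++ "Comments: \n".toList else sakai)
          ++ pvLine prblm d' q_com
        pvLoopA sakai' (prblm + 1) true rest
      else
        pvLoopA sakai (prblm + 1) header rest

def build_comment (netid : String) (comments : List String) : String × Int :=
  let score := calc_score comments
  let sakai := pvHead netid score
  (String.ofList (pvLoopA sakai 1 false comments), score)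

-- ===== PORT B =====
def pvTryInt (s : String) : Option Int := PySem.Int.ofStr? s   -- _try_int

-- zip(it, it) over the same iterator: consecutive pairs, a leftover odd element is dropped
def pvPairs : List String → List (String × String)
  | c :: d :: r => (c, d) :: pvPairs r
  | _ => []

def build_comment_alt (netid : String) (comments : List String) : String × Int :=
  let score : Int := 100 - comments.foldl (fun acc s =>
    match pvTryInt s with
    | some v => acc + |v|
    | none   => acc) 0
  let lines : List (List Char) :=
    (PySem.List.enumerate (pvPairs comments) 1).filterMap (fun p =>
      match PySem.Int.ofStr? p.2.2 with
      | some d => if d ≠ 0 then some (pvLine p.1 (-|d|) p.2.1) else none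
      | none   => none)                -- int(d) raises ValueError (excluded by Pre_)
  let head := pvHead netid score
  (String.ofList (if lines = [] then head else head ++ "Comments: \n".toList ++ lines.flatten), score)

-- ===== PRECONDITION & SPEC =====
-- Pre_: A returns iff the list splits into (comment, deduction) pairs — even length — and every
-- deduction string parses as a Python int; otherwise A raises IndexError or ValueError.
def pvDedsOk : List String → Bool
  | [] => true
  | [_] => false
  | _ :: d :: r => (PySem.Int.ofStr? d).isSome && pvDedsOk r

def Pre_build_comment (netid : String) (comments : List String) : Prop :=
  pvDedsOk comments = true
instance (netid : String) (comments : List String) : Decidable (Pre_build_comment netid comments) := by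
  unfold Pre_build_comment; infer_instance

def pvWitness_build_comment : String × List String := ("bob", ["good", "0", "late", "2"])

def Spec_build_comment (netid : String) (comments : List String) (out : String × Int) : Prop := out = build_comment_alt netid comments
instance (netid : String) (comments : List String) (out : String × Int) : Decidable (Spec_build_comment netid comments out) := by unfold Spec_build_comment; infer_instance

-- ===== CLAIM (what is proved, stated in full; the proofs are below) =====
def Claim_equal_build_comment : Prop := ∀ (netid : String) (comments : List String), Dom_build_comment netid comments → Pre_build_comment netid comments → Spec_build_comment netid comments (build_comment netid comments)


-- ===== LEMMAS AND PROOFS =====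

-- the two score folds agree: A subtracts from 100, B sums the deductions and subtracts once
-- the deduction a single item contributes to the score
def pvDed (s : String) : Int :=
  match PySem.Int.ofStr? s with
  | some v => |v|
  | none   => 0

theorem pv_score_fold (xs : List String) : ∀ acc : Int,
    xs.foldl (fun score item =>
      match PySem.Int.ofStr? item with
      | some n => score - |n|
      | none   => score) acc
    = acc - xs.foldl (fun acc s =>
      match pvTryInt s with
      | some v => acc + |v|
      | none   => acc) 0 := by
  intro acc
  have hA : (fun (score : Int) (item : String) =>
      match PySem.Int.ofStr? item with
      | some n => score - |n|
      | none   => score) = fun score item => score + (-(pvDed item)) := by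
    funext score item
    unfold pvDed
    cases PySem.Int.ofStr? item <;> simp; ring
  have hB : (fun (acc : Int) (s : String) =>
      match pvTryInt s with
      | some v => acc + |v|
      | none   => acc) = fun acc s => acc + pvDed s := by
    funext a s
    unfold pvTryInt pvDed
    cases PySem.Int.ofStr? s <;> simp
  rw [hA, hB, PySem.List.foldl_add, PySem.List.foldl_add]
  rw [show (xs.map fun item => -pvDed item) = (xs.map pvDed).map (fun x => -x) by simp]
  rw [← List.sum_neg]
  ring


-- B's line list for a given starting problem number
def pvLinesB (p : Int) (l : List String) : List (List Char) :=
  (PySem.List.enumerate (pvPairs l) p).filterMap (fun q =>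
    match PySem.Int.ofStr? q.2.2 with
    | some d => if d ≠ 0 then some (pvLine q.1 (-|d|) q.2.1) else none
    | none   => none)

theorem pv_loop_eq (l : List String) (h : pvDedsOk l = true) : ∀ (p : Int) (sakai : List Char),
    (pvLoopA sakai p false l =
      (if pvLinesB p l = [] then sakai
       else sakai ++ "Comments: \n".toList ++ (pvLinesB p l).flatten))
    ∧ (pvLoopA sakai p true l = sakai ++ (pvLinesB p l).flatten) :=
  match l, h with
  | [], _ => by
    intro p sakai
    simp [pvLoopA, pvLinesB, pvPairs]
  | [x], h => by
    simp [pvDedsOk] at h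
  | c :: d :: r, h => by
    have hh : (PySem.Int.ofStr? d).isSome = true ∧ pvDedsOk r = true := by
      simpa [pvDedsOk, Bool.and_eq_true] using h
    obtain ⟨v, hv⟩ := Option.isSome_iff_exists.mp hh.1
    intro p sakai
    have IH := pv_loop_eq r hh.2
    have hlines : pvLinesB p (c :: d :: r) =
        (if v ≠ 0 then [pvLine p (-|v|) c] else []) ++ pvLinesB (p + 1) r := by
      unfold pvLinesB
      rw [show pvPairs (c :: d :: r) = (c, d) :: pvPairs r from rfl,
        PySem.List.enumerate_cons, List.filterMap_cons]
      by_cases hz : v = 0 <;> simp [hv, hz]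
    by_cases hz : v = 0
    · have hA : ∀ b, pvLoopA sakai p b (c :: d :: r) = pvLoopA sakai (p + 1) b r := by
        intro b; simp [pvLoopA, hv, hz]
      rw [hlines]
      simp only [hz, ne_eq, not_true_eq_false, if_false, List.nil_append]
      exact ⟨by rw [hA]; exact (IH (p + 1) sakai).1, by rw [hA]; exact (IH (p + 1) sakai).2⟩
    · rw [hlines]
      simp only [hz, ne_eq, not_false_eq_true, if_true]
      constructor
      · have hA : pvLoopA sakai p false (c :: d :: r) =
            pvLoopA (sakai ++ "Comments: \n".toList ++ pvLine p (-1 * |v|) c) (p + 1) true r := by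
          simp [pvLoopA, hv, hz, List.append_assoc]
        rw [hA, (IH (p + 1) _).2, neg_one_mul]
        simp [List.append_assoc]
      · have hA : pvLoopA sakai p true (c :: d :: r) =
            pvLoopA (sakai ++ pvLine p (-1 * |v|) c) (p + 1) true r := by
          simp [pvLoopA, hv, hz]
        rw [hA, (IH (p + 1) _).2, neg_one_mul]
        simp [List.append_assoc]

-- ===== VERDICT (by name: the statement is the Claim_ definition above) =====
theorem build_comment_spec : Claim_equal_build_comment := by
  intro netid comments _ hpre
  unfold Spec_build_comment build_comment build_comment_alt
  have hscore : calc_score comments =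
      100 - comments.foldl (fun acc s =>
        match pvTryInt s with
        | some v => acc + |v|
        | none   => acc) 0 := pv_score_fold comments 100
  rw [← hscore]
  have hstr := (pv_loop_eq comments hpre 1 (pvHead netid (calc_score comments))).1
  exact Prod.ext (congrArg String.ofList hstr) rfl
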